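-- pv_equiv track=rewrite | github.com/aedorado/fls-shoe-app | Flask Backend/API.py | compare_maps
-- ===== SOURCE A (Python) =====
-- def compare_maps(map1, map2):
-- 	msum = 0
-- 	for key in map1.keys():
-- 		if key in map2:
-- 			# print key, map1[key], map2[key]
-- 			msum += (map1[key] - map2[key]) ** 2
-- 	for key in map1.keys():
-- 		if not key in map2:
-- 			msum += (1 + map1[key]) ** 2
-- 	for key in map2.keys():
-- 		if not key in map1:
-- 			msum += (1 + map2[key]) ** 2
-- 	return msum
-- ===== SOURCE B (Python) =====
-- def compare_maps(map1, map2):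
-- 	# Sort-and-merge: walk the two sorted key lists with two pointers; equal keys
-- 	# contribute (v1-v2)**2, an unmatched key k of either map contributes (1+v)**2.
-- 	ks1 = sorted(map1)
-- 	ks2 = sorted(map2)
-- 	i = j = 0
-- 	total = 0
-- 	while i < len(ks1) and j < len(ks2):
-- 		a, b = ks1[i], ks2[j]
-- 		if a == b:
-- 			total += (map1[a] - map2[b]) ** 2
-- 			i += 1
-- 			j += 1
-- 		elif a < b:
-- 			total += (1 + map1[a]) ** 2
-- 			i += 1
-- 		else:
-- 			total += (1 + map2[b]) ** 2
-- 			j += 1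
-- 	while i < len(ks1):
-- 		total += (1 + map1[ks1[i]]) ** 2
-- 		i += 1
-- 	while j < len(ks2):
-- 		total += (1 + map2[ks2[j]]) ** 2
-- 		j += 1
-- 	return total
-- ===== Notes on version B (the rewrite author's own statement) =====
-- stated objective: alternative
-- what changed: Replaces A's three hash-membership-filtered scans with a sort-and-merge: both key lists are sorted and a two-pointer merge classifies every key as matched or unmatched in one synchronized walk, so no membership test against the other map remains.
import Mathlib
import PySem

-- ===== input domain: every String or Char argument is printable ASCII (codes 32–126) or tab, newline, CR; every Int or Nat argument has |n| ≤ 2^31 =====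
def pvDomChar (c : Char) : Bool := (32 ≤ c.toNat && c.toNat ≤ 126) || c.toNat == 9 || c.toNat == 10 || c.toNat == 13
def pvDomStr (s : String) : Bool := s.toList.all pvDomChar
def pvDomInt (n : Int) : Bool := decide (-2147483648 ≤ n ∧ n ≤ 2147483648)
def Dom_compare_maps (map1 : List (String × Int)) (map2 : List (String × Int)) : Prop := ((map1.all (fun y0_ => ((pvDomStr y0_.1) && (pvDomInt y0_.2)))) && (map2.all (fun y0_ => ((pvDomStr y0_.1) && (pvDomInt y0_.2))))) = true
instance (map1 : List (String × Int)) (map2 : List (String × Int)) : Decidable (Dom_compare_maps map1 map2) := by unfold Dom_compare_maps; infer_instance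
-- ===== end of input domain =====

-- B replaces A's three membership-filtered scans with a sort-and-merge over the two
-- sorted key lists (two-pointer walk); an alternative algorithm of similar cost.


-- ===== PORT A =====
def compare_maps (map1 : List (String × Int)) (map2 : List (String × Int)) : Int :=
  let d1 : PySem.Dict String Int := PySem.Dict.ofList map1
  let d2 : PySem.Dict String Int := PySem.Dict.ofList map2
  let msum : Int := 0
  let msum := d1.keys.foldl (fun msum key =>
    if d2.contains key then msum + (d1.getD key 0 - d2.getD key 0) ^ 2 else msum) msum
  let msum := d1.keys.foldl (fun msum key =>
    if !(d2.contains key) then msum + (1 + d1.getD key 0) ^ 2 else msum) msum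
  let msum := d2.keys.foldl (fun msum key =>
    if !(d1.contains key) then msum + (1 + d2.getD key 0) ^ 2 else msum) msum
  msum

-- ===== PORT B =====
-- the two-pointer merge loop of Source B (the while over both lists, then the two tail loops)
def cmMerge (d1 d2 : PySem.Dict String Int) : List String → List String → Int → Int
  | a :: t1, b :: t2, total =>
    if a = b then cmMerge d1 d2 t1 t2 (total + (d1.getD a 0 - d2.getD b 0) ^ 2)
    else if a < b then cmMerge d1 d2 t1 (b :: t2) (total + (1 + d1.getD a 0) ^ 2)
    else cmMerge d1 d2 (a :: t1) t2 (total + (1 + d2.getD b 0) ^ 2)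
  | ks1, [], total => ks1.foldl (fun tot k => tot + (1 + d1.getD k 0) ^ 2) total
  | [], ks2, total => ks2.foldl (fun tot k => tot + (1 + d2.getD k 0) ^ 2) total
termination_by l1 l2 _ => l1.length + l2.length

def compare_maps_alt (map1 : List (String × Int)) (map2 : List (String × Int)) : Int :=
  let d1 : PySem.Dict String Int := PySem.Dict.ofList map1
  let d2 : PySem.Dict String Int := PySem.Dict.ofList map2
  let ks1 := PySem.List.sorted d1.keys (fun k => k)
  let ks2 := PySem.List.sorted d2.keys (fun k => k)
  cmMerge d1 d2 ks1 ks2 0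

-- ===== PRECONDITION & SPEC =====
def Spec_compare_maps (map1 : List (String × Int)) (map2 : List (String × Int)) (out : Int) : Prop := out = compare_maps_alt map1 map2
instance (map1 : List (String × Int)) (map2 : List (String × Int)) (out : Int) : Decidable (Spec_compare_maps map1 map2 out) := by unfold Spec_compare_maps; infer_instance

-- ===== CLAIM (what is proved, stated in full; the proofs are below) =====
def Claim_equal_compare_maps : Prop := ∀ (map1 : List (String × Int)) (map2 : List (String × Int)), Dom_compare_maps map1 map2 → Spec_compare_maps map1 map2 (compare_maps map1 map2)

-- ===== LEMMAS AND PROOFS =====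

-- splitting a sum of a conditional map into the two filtered sums
lemma sum_map_ite_split (l : List String) (p : String → Bool) (f g : String → Int) :
    (l.map (fun k => if p k then f k else g k)).sum
      = ((l.filter p).map f).sum + ((l.filter (fun k => !p k)).map g).sum := by
  induction l with
  | nil => simp
  | cons x xs ih => by_cases h : p x <;> simp [h, ih] <;> ring

-- the merge loop on strictly increasing key lists computes the classified sum
lemma cmMerge_eq (d1 d2 : PySem.Dict String Int) (l1 l2 : List String) (total : Int)
    (h1 : l1.Pairwise (· < ·)) (h2 : l2.Pairwise (· < ·)) :
    cmMerge d1 d2 l1 l2 total =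
      total
      + (l1.map (fun k => if k ∈ l2 then (d1.getD k 0 - d2.getD k 0) ^ 2
                          else (1 + d1.getD k 0) ^ 2)).sum
      + ((l2.filter (fun k => decide (k ∉ l1))).map (fun k => (1 + d2.getD k 0) ^ 2)).sum := by
  fun_induction cmMerge d1 d2 l1 l2 total with
  | case1 t1 a t2 total ih =>
    rw [List.pairwise_cons] at h1 h2
    rw [ih h1.2 h2.2]
    have hm1 : t1.map (fun k => if k ∈ t2 then (d1.getD k 0 - d2.getD k 0) ^ 2
                          else (1 + d1.getD k 0) ^ 2)
        = t1.map (fun k => if k ∈ a :: t2 then (d1.getD k 0 - d2.getD k 0) ^ 2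
                          else (1 + d1.getD k 0) ^ 2) := by
      apply List.map_congr_left; intro k hk
      have hka : k ≠ a := fun h => absurd (h ▸ h1.1 k hk) (lt_irrefl a)
      simp [List.mem_cons, hka]
    have hf : t2.filter (fun k => decide (k ∉ t1))
        = t2.filter (fun k => decide (k ∉ a :: t1)) := by
      apply List.filter_congr; intro k hk
      have hka : k ≠ a := fun h => absurd (h ▸ h2.1 k hk) (lt_irrefl a)
      simp [List.mem_cons, hka]
    simp only [List.map_cons, List.sum_cons, List.filter_cons, List.mem_cons]
    rw [hm1, hf]
    simp
    ring
  | case2 a t1 b t2 total hab hlt ih =>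
    rw [List.pairwise_cons] at h1
    rw [ih h1.2 h2]
    have hna : a ∉ b :: t2 := by
      rw [List.pairwise_cons] at h2
      intro hmem
      rcases List.mem_cons.mp hmem with h | h
      · exact hab h
      · exact absurd (lt_trans hlt (h2.1 a h)) (lt_irrefl a)
    have hf : (b :: t2).filter (fun k => decide (k ∉ t1))
        = (b :: t2).filter (fun k => decide (k ∉ a :: t1)) := by
      apply List.filter_congr; intro k hk
      have hka : k ≠ a := by
        rw [List.pairwise_cons] at h2
        rcases List.mem_cons.mp hk with h | h
        · exact fun he => hab (he ▸ h)
        · exact fun he => absurd (lt_trans hlt (h2.1 k h)) (he ▸ lt_irrefl a)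
      simp [List.mem_cons, hka]
    simp only [List.map_cons, List.sum_cons, if_neg hna]
    rw [hf]; ring
  | case3 a t1 b t2 total hab hlt ih =>
    have hba : b < a := by
      rcases lt_trichotomy a b with h | h | h
      · exact absurd h hlt
      · exact absurd h hab
      · exact h
    rw [List.pairwise_cons] at h2
    rw [ih h1 h2.2]
    have hnb : b ∉ a :: t1 := by
      rw [List.pairwise_cons] at h1
      intro hmem
      rcases List.mem_cons.mp hmem with h | h
      · exact absurd (h ▸ hba) (lt_irrefl a)
      · exact absurd (lt_trans hba (h1.1 b h)) (lt_irrefl b)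
    have hm1 : (a :: t1).map (fun k => if k ∈ t2 then (d1.getD k 0 - d2.getD k 0) ^ 2
                          else (1 + d1.getD k 0) ^ 2)
        = (a :: t1).map (fun k => if k ∈ b :: t2 then (d1.getD k 0 - d2.getD k 0) ^ 2
                          else (1 + d1.getD k 0) ^ 2) := by
      apply List.map_congr_left; intro k hk
      have hkb : k ≠ b := by
        rw [List.pairwise_cons] at h1
        rcases List.mem_cons.mp hk with h | h
        · exact fun he => absurd ((h.symm ▸ he : a = b) ▸ hba) (lt_irrefl b)
        · exact fun he => absurd (lt_trans hba (h1.1 k h)) (he ▸ lt_irrefl b)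
      simp [List.mem_cons, hkb]
    rw [← hm1]
    simp only [List.filter_cons, hnb, not_false_eq_true, decide_true,
      if_pos, List.map_cons, List.sum_cons]
    ring
  | case4 ks1 total =>
    rw [PySem.List.foldl_add]
    have : ks1.map (fun k => if k ∈ ([] : List String) then (d1.getD k 0 - d2.getD k 0) ^ 2
                          else (1 + d1.getD k 0) ^ 2)
        = ks1.map (fun k => (1 + d1.getD k 0) ^ 2) := by
      apply List.map_congr_left; intro k _; simp
    rw [this]; simp
  | case5 ks2 total h =>
    rw [PySem.List.foldl_add]
    simp

-- the sorted key list of a dict is strictly increasing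
lemma sorted_keys_pairwise_lt (d : PySem.Dict String Int) (hn : d.keys.Nodup) :
    (PySem.List.sorted d.keys (fun k => k)).Pairwise (· < ·) := by
  have hle := PySem.List.sorted_pairwise d.keys (fun k => k)
  have hnd : (PySem.List.sorted d.keys (fun k => k)).Nodup :=
    (PySem.List.sorted_perm d.keys (fun k => k) false).nodup_iff.mpr hn
  exact (hle.and hnd).imp (fun h => lt_of_le_of_ne h.1 h.2)

-- the merge of the two sorted key lists equals A's three filtered sums
lemma cm_main (d1 d2 : PySem.Dict String Int)
    (hn1 : d1.keys.Nodup) (hn2 : d2.keys.Nodup) :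
    cmMerge d1 d2 (PySem.List.sorted d1.keys (fun k => k))
                  (PySem.List.sorted d2.keys (fun k => k)) 0
    = ((d1.keys.filter (fun k => d2.contains k)).map
          (fun k => (d1.getD k 0 - d2.getD k 0) ^ 2)).sum
    + ((d1.keys.filter (fun k => !(d2.contains k))).map
          (fun k => (1 + d1.getD k 0) ^ 2)).sum
    + ((d2.keys.filter (fun k => !(d1.contains k))).map
          (fun k => (1 + d2.getD k 0) ^ 2)).sum := by
  have hperm1 := PySem.List.sorted_perm d1.keys (fun k => k) false
  have hperm2 := PySem.List.sorted_perm d2.keys (fun k => k) false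
  rw [cmMerge_eq _ _ _ _ _ (sorted_keys_pairwise_lt d1 hn1) (sorted_keys_pairwise_lt d2 hn2)]
  have hmap : (PySem.List.sorted d1.keys (fun k => k)).map
        (fun k => if k ∈ PySem.List.sorted d2.keys (fun k => k)
                  then (d1.getD k 0 - d2.getD k 0) ^ 2 else (1 + d1.getD k 0) ^ 2)
      = (PySem.List.sorted d1.keys (fun k => k)).map
        (fun k => if d2.contains k
                  then (d1.getD k 0 - d2.getD k 0) ^ 2 else (1 + d1.getD k 0) ^ 2) := by
    apply List.map_congr_left; intro k _
    have : (k ∈ PySem.List.sorted d2.keys (fun k => k)) ↔ (d2.contains k = true) := by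
      rw [PySem.List.mem_sorted, PySem.Dict.contains_iff_mem_keys]
    by_cases h : d2.contains k = true
    · rw [if_pos (this.mpr h), if_pos h]
    · rw [if_neg (fun hm => h (this.mp hm)), if_neg h]
  have hfil : (PySem.List.sorted d2.keys (fun k => k)).filter
        (fun k => decide (k ∉ PySem.List.sorted d1.keys (fun k => k)))
      = (PySem.List.sorted d2.keys (fun k => k)).filter (fun k => !(d1.contains k)) := by
    apply List.filter_congr; intro k _
    have : (k ∈ PySem.List.sorted d1.keys (fun k => k)) ↔ (d1.contains k = true) := by
      rw [PySem.List.mem_sorted, PySem.Dict.contains_iff_mem_keys]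
    by_cases h : d1.contains k = true
    · simp [this.mpr h, h]
    · have hk : k ∉ d1.keys := fun hm => h ((PySem.Dict.contains_iff_mem_keys d1 k).mpr hm)
      have hk' : k ∉ PySem.List.sorted d1.keys (fun k => k) := fun hm => h (this.mp hm)
      simp [h, hk']
  rw [hmap, hfil]
  rw [(hperm1.map _).sum_eq, ((hperm2.filter _).map _).sum_eq]
  rw [sum_map_ite_split]
  ring

-- ===== VERDICT (by name: the statement is the Claim_ definition above) =====
theorem compare_maps_spec : Claim_equal_compare_maps := by
  intro map1 map2 _
  unfold Spec_compare_maps compare_maps compare_maps_alt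
  simp only [PySem.List.foldl_if_eq_foldl_filter, PySem.List.foldl_add, zero_add]
  rw [cm_main _ _ (PySem.Dict.nodup_keys_ofList map1) (PySem.Dict.nodup_keys_ofList map2)]
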